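-- pv_equiv track=rewrite | github.com/OTOYO1020/ChatDev_Intermediate | WareHouse/E_260__20250505155113/utils.py | calculate_good_sequences
-- ===== SOURCE A (Python) =====
-- def calculate_good_sequences(M, pairs):
--     '''
--     Calculate the number of good sequences of lengths 1 to M based on the given pairs.
--     Parameters:
--     M (int): The maximum length of sequences.
--     pairs (list of tuples): List of pairs (A_i, B_i) indicating valid positions.
--     Returns:
--     list: A list containing the count of good sequences for each length from 1 to M.
--     '''
--     good_count = [0] * M  # Initialize the good count array
--     for A, B in pairs:
--         good_count[A - 1] += 1  # Increment count for position A
--         good_count[B - 1] += 1  # Increment count for position B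
--     f = [0] * M  # Initialize the result list for good sequences
--     for k in range(1, M + 1):
--         count = 0
--         valid_length = 0
--         for i in range(M):
--             if good_count[i] > 0:
--                 valid_length += 1
--             else:
--                 valid_length = 0
--             # Count valid segments of exactly length k
--             if valid_length == k:
--                 count += 1  # Count this segment as valid for length k
--             elif valid_length > k:
--                 count += 1  # Count the segment of length k ending at i
--         f[k - 1] = count  # Store the count for length k
--     return f
-- ===== SOURCE B (Python) =====
-- def calculate_good_sequences(M, pairs):
--     good_count = [0] * M
--     for A, B in pairs:
--         good_count[A - 1] += 1
--         good_count[B - 1] += 1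
--     # One pass: streak length ending at each position
--     streaks = []
--     streak = 0
--     for c in good_count:
--         streak = streak + 1 if c > 0 else 0
--         streaks.append(streak)
--     # Histogram of streak lengths
--     hist = {}
--     for v in streaks:
--         hist[v] = hist.get(v, 0) + 1
--     # f[k-1] = #positions with streak >= k: suffix sums of the histogram
--     f = []
--     s = 0
--     for k in range(M, 0, -1):
--         s += hist.get(k, 0)
--         f.append(s)
--     f.reverse()
--     return f
-- ===== Notes on version B (the rewrite author's own statement) =====
-- stated objective: faster
-- what changed: A rescans the whole position array once per k (M nested passes); B computes the run-length (streak) of good positions in one pass, histograms the streak values in a dict, and fills all M answers by one suffix-sum sweep.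
import Mathlib
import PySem

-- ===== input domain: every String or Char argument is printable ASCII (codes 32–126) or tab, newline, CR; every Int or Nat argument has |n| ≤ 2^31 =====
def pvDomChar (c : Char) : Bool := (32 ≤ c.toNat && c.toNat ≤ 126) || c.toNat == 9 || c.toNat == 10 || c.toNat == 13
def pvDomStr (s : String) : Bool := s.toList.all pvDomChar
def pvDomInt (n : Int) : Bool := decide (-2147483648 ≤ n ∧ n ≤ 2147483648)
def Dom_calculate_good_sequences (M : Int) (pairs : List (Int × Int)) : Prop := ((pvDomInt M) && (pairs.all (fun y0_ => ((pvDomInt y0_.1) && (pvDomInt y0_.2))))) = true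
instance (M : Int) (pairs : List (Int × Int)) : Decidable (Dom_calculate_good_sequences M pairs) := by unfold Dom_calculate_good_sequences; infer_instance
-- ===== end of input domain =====

-- B replaces A's per-k rescans by one streak pass + histogram + suffix-sum sweep (measured asymptotically faster).


-- shared primitive: Python's statement `l[i] += 1` (negative index wraps; out of range Python raises — excluded by Pre_, here a no-op)
def pvIncr (l : List Int) (i : Int) : List Int :=
  PySem.List.pySetD l i (PySem.List.pyGetD l i 0 + 1)

-- ===== PORT A =====
def calculate_good_sequences (M : Int) (pairs : List (Int × Int)) : List Int :=
  let good_count := pairs.foldl (fun gc ab => pvIncr (pvIncr gc (ab.1 - 1)) (ab.2 - 1)) (List.replicate M.toNat 0)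
  -- for k in range(1, M+1): inner scan over i in range(M) reading good_count[i]
  (PySem.List.pyRange 1 (M + 1) 1).map (fun k =>
    ((PySem.List.pyRange 0 M 1).foldl (fun (st : Int × Int) i =>
        let c := PySem.List.pyGetD good_count i 0
        let vl := if c > 0 then st.2 + 1 else (0 : Int)
        let cnt := if vl = k then st.1 + 1 else if vl > k then st.1 + 1 else st.1
        (cnt, vl)) (0, 0)).1)

-- ===== PORT B =====
def calculate_good_sequences_alt (M : Int) (pairs : List (Int × Int)) : List Int :=
  let good_count := pairs.foldl (fun gc ab => pvIncr (pvIncr gc (ab.1 - 1)) (ab.2 - 1)) (List.replicate M.toNat 0)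
  let streaks := (good_count.foldl (fun (st : List Int × Int) c =>
      let s := if c > 0 then st.2 + 1 else (0 : Int)
      (st.1 ++ [s], s)) ([], 0)).1
  let hist := streaks.foldl (fun (d : PySem.Dict Int Int) v => d.insert v (d.getD v 0 + 1)) PySem.Dict.empty
  let f := ((PySem.List.pyRange M 0 (-1)).foldl (fun (st : Int × List Int) k =>
      let s := st.1 + hist.getD k 0
      (s, st.2 ++ [s])) (0, [])).2
  f.reverse

-- ===== PRECONDITION & SPEC =====
-- Pre_ excludes exactly the inputs where Python A raises IndexError: a pair component whose
-- index A-1 / B-1 is outside Python's accepted range [-M, M-1] for the length-M array.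
def Pre_calculate_good_sequences (M : Int) (pairs : List (Int × Int)) : Prop :=
  ∀ p ∈ pairs, 1 - M ≤ p.1 ∧ p.1 ≤ M ∧ 1 - M ≤ p.2 ∧ p.2 ≤ M
instance (M : Int) (pairs : List (Int × Int)) : Decidable (Pre_calculate_good_sequences M pairs) := by unfold Pre_calculate_good_sequences; infer_instance
def pvWitness_calculate_good_sequences : Int × (List (Int × Int)) := (3, [(1, 2), (3, 3)])

def Spec_calculate_good_sequences (M : Int) (pairs : List (Int × Int)) (out : List Int) : Prop := out = calculate_good_sequences_alt M pairs
instance (M : Int) (pairs : List (Int × Int)) (out : List Int) : Decidable (Spec_calculate_good_sequences M pairs out) := by unfold Spec_calculate_good_sequences; infer_instance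

-- ===== CLAIM (what is proved, stated in full; the proofs are below) =====
def Claim_equal_calculate_good_sequences : Prop := ∀ (M : Int) (pairs : List (Int × Int)), Dom_calculate_good_sequences M pairs → Pre_calculate_good_sequences M pairs → Spec_calculate_good_sequences M pairs (calculate_good_sequences M pairs)

-- ===== LEMMAS AND PROOFS =====

-- [M, M-1, ..., 1]
def pvDesc : Nat → List Int
  | 0 => []
  | n + 1 => ((n : Int) + 1) :: pvDesc n

-- streak lengths ending at each position
def pvStreaks (s : Int) : List Int → List Int
  | [] => []
  | c :: t => let s' := if c > 0 then s + 1 else 0; s' :: pvStreaks s' t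

-- running suffix sums
def pvScan (h : Int → Int) (s : Int) : List Int → List Int
  | [] => []
  | k :: t => (s + h k) :: pvScan h (s + h k) t

def pvSsum (h : Int → Int) (n : Nat) (k : Int) : Int :=
  (((pvDesc n).filter (fun v => k ≤ v)).map h).sum

theorem mem_pvDesc (n : Nat) (x : Int) : x ∈ pvDesc n ↔ 1 ≤ x ∧ x ≤ (n : Int) := by
  induction n with
  | zero => simp [pvDesc]; omega
  | succ m ih => simp [pvDesc, ih]; omega

theorem nodup_pvDesc (n : Nat) : (pvDesc n).Nodup := by
  induction n with
  | zero => simp [pvDesc]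
  | succ m ih =>
    simp [pvDesc, ih, mem_pvDesc]

theorem pyRange_neg_nat (n : Nat) : PySem.List.pyRange (n : Int) 0 (-1) = pvDesc n := by
  induction n with
  | zero => rw [PySem.List.pyRange_neg_one_eq_nil (by omega)]; rfl
  | succ m ih =>
    rw [PySem.List.pyRange_neg_one_cons (by push_cast; omega)]
    have h1 : ((m : Int) + 1) - 1 = (m : Int) := by ring
    push_cast
    rw [h1, ih]
    rfl

theorem pyRange_neg_eq_pvDesc (M : Int) : PySem.List.pyRange M 0 (-1) = pvDesc M.toNat := by
  by_cases h : M ≤ 0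
  · rw [PySem.List.pyRange_neg_one_eq_nil h]
    have : M.toNat = 0 := by omega
    rw [this]; rfl
  · obtain ⟨n, rfl⟩ : ∃ n : Nat, M = (n : Int) := ⟨M.toNat, by omega⟩
    rw [pyRange_neg_nat, Int.toNat_natCast]

theorem pyRange_pos_nat (n : Nat) : PySem.List.pyRange 1 ((n : Int) + 1) 1 = (pvDesc n).reverse := by
  induction n with
  | zero => rw [PySem.List.pyRange_one_eq_nil (by omega)]; rfl
  | succ m ih =>
    have : ((m + 1 : Nat) : Int) + 1 = ((m : Int) + 1) + 1 := by push_cast; ring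
    rw [this, PySem.List.pyRange_one_succ_right (by omega), ih]
    simp [pvDesc]

theorem pyRange_pos_eq_pvDesc_reverse (M : Int) :
    PySem.List.pyRange 1 (M + 1) 1 = (pvDesc M.toNat).reverse := by
  by_cases h : M ≤ 0
  · rw [PySem.List.pyRange_one_eq_nil (by omega)]
    have : M.toNat = 0 := by omega
    rw [this]; rfl
  · obtain ⟨n, rfl⟩ : ∃ n : Nat, M = (n : Int) := ⟨M.toNat, by omega⟩
    rw [pyRange_pos_nat, Int.toNat_natCast]

theorem streaks_foldl (gc : List Int) : ∀ (acc : List Int) (s : Int),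
    (gc.foldl (fun (st : List Int × Int) c =>
      let s' := if c > 0 then st.2 + 1 else (0 : Int)
      (st.1 ++ [s'], s')) (acc, s)).1 = acc ++ pvStreaks s gc := by
  induction gc with
  | nil => intro acc s; simp [pvStreaks]
  | cons c t ih =>
    intro acc s
    simp only [List.foldl_cons, pvStreaks]
    rw [ih]
    simp

theorem mem_pvStreaks_bound (gc : List Int) : ∀ (s : Int), 0 ≤ s →
    ∀ x ∈ pvStreaks s gc, 0 ≤ x ∧ x ≤ s + gc.length := by
  induction gc with
  | nil => intro s hs x hx; simp [pvStreaks] at hx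
  | cons c t ih =>
    intro s hs x hx
    simp only [pvStreaks, List.mem_cons] at hx
    rcases hx with rfl | hx
    · split <;> simp <;> omega
    · by_cases hc : c > 0
      · have := ih (s + 1) (by omega) x (by simpa [pvStreaks, hc] using hx)
        simp; omega
      · have := ih 0 le_rfl x (by simpa [pvStreaks, hc] using hx)
        simp; omega

theorem innerA_eq_countP (k : Int) (_hk : 1 ≤ k) (gc : List Int) : ∀ (c0 s : Int),
    (gc.foldl (fun (st : Int × Int) c =>
        let vl := if c > 0 then st.2 + 1 else (0 : Int)
        let cnt := if vl = k then st.1 + 1 else if vl > k then st.1 + 1 else st.1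
        (cnt, vl)) (c0, s)).1
      = c0 + ((pvStreaks s gc).countP (fun v => k ≤ v) : Int) := by
  induction gc with
  | nil => intro c0 s; simp [pvStreaks]
  | cons c t ih =>
    intro c0 s
    simp only [List.foldl_cons, pvStreaks, List.countP_cons]
    set s' : Int := if c > 0 then s + 1 else 0 with hs'
    rw [ih]
    by_cases h : k ≤ s'
    · have h1 : (s' = k) ∨ (s' > k) := by omega
      rcases h1 with h1 | h1 <;> simp [h1, h] <;> omega
    · have h1 : ¬ (s' = k) := by omega
      have h2 : ¬ (s' > k) := by omega
      simp [h1, h2, h]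

theorem scan_foldl (h : Int → Int) (ks : List Int) : ∀ (s : Int) (acc : List Int),
    (ks.foldl (fun (st : Int × List Int) k =>
      (st.1 + h k, st.2 ++ [st.1 + h k])) (s, acc)).2 = acc ++ pvScan h s ks := by
  induction ks with
  | nil => intro s acc; simp [pvScan]
  | cons k t ih =>
    intro s acc
    simp only [List.foldl_cons, pvScan]
    rw [ih]
    simp

theorem pvScan_pvDesc (h : Int → Int) (n : Nat) : ∀ (s : Int),
    pvScan h s (pvDesc n) = (pvDesc n).map (fun k => s + pvSsum h n k) := by
  induction n with
  | zero => intro s; simp [pvDesc, pvScan]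
  | succ m ih =>
    intro s
    have hhead : pvSsum h (m + 1) ((m : Int) + 1) = h ((m : Int) + 1) := by
      unfold pvSsum
      simp only [pvDesc, List.filter_cons]
      rw [if_pos (by simp), List.filter_eq_nil_iff.mpr]
      · simp
      · intro v hv
        simp [mem_pvDesc] at hv ⊢
        omega
    have htail : ∀ k ∈ pvDesc m, pvSsum h (m + 1) k = h ((m : Int) + 1) + pvSsum h m k := by
      intro k hk
      have hk' := (mem_pvDesc m k).mp hk
      unfold pvSsum
      simp only [pvDesc, List.filter_cons]
      rw [if_pos (by simp; omega)]
      simp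
    simp only [pvDesc, pvScan, List.map_cons]
    rw [hhead, ih]
    congr 1
    apply List.map_congr_left
    intro k hk
    rw [htail k hk]
    ring

theorem indicator_sum (e : Int) (p : Int → Bool) (vs : List Int) (hnd : vs.Nodup) :
    ((vs.filter p).map (fun v => if e = v then (1 : Int) else 0)).sum
      = if p e ∧ e ∈ vs then 1 else 0 := by
  induction vs with
  | nil => simp
  | cons v t ih =>
    have hnd' : t.Nodup := hnd.of_cons
    have hvt : v ∉ t := by simp at hnd; exact hnd.1
    simp only [List.filter_cons]
    by_cases hpv : p v = true
    · rw [if_pos hpv]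
      simp only [List.map_cons, List.sum_cons, ih hnd']
      by_cases hev : e = v
      · subst hev
        simp [hvt, hpv]
      · simp only [if_neg hev, List.mem_cons]
        have : (e = v ∨ e ∈ t) ↔ e ∈ t := by
          constructor
          · rintro (rfl | h) <;> [exact absurd rfl hev; exact h]
          · exact Or.inr
        rw [zero_add]
        simp [this]
    · rw [if_neg hpv, ih hnd']
      by_cases hev : e = v
      · subst hev; simp [hpv]
      · simp [List.mem_cons, hev]

theorem sum_counts_eq_countP (l : List Int) (p : Int → Bool) (vs : List Int)
    (hnd : vs.Nodup) (hcov : ∀ x ∈ l, p x → x ∈ vs) :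
    ((vs.filter p).map (fun v => (l.count v : Int))).sum = (l.countP p : Int) := by
  induction l with
  | nil => simp
  | cons e t ih =>
    have hcov' : ∀ x ∈ t, p x → x ∈ vs := fun x hx => hcov x (List.mem_cons_of_mem _ hx)
    have hsplit : ((vs.filter p).map (fun v => ((e :: t).count v : Int))).sum
        = ((vs.filter p).map (fun v => (t.count v : Int))).sum
          + ((vs.filter p).map (fun v => if e = v then (1 : Int) else 0)).sum := by
      rw [← List.sum_map_add]
      apply congrArg
      apply List.map_congr_left
      intro v hv
      rw [List.count_cons]
      by_cases hev : e = v <;> simp [hev]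
    rw [hsplit, ih hcov', indicator_sum e p vs hnd, List.countP_cons]
    by_cases hpe : p e = true
    · have : e ∈ vs := hcov e List.mem_cons_self hpe
      simp [hpe, this]
    · simp [hpe]

theorem length_pvIncr (l : List Int) (i : Int) : (pvIncr l i).length = l.length := by
  simp [pvIncr, PySem.List.length_pySetD]

theorem length_good_count (pairs : List (Int × Int)) : ∀ (l : List Int),
    (pairs.foldl (fun gc ab => pvIncr (pvIncr gc (ab.1 - 1)) (ab.2 - 1)) l).length = l.length := by
  induction pairs with
  | nil => intro l; rfl
  | cons p t ih =>
    intro l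
    rw [List.foldl_cons, ih, length_pvIncr, length_pvIncr]

theorem portA_char (M : Int) (gc : List Int) (hlen : gc.length = M.toNat) :
    ((PySem.List.pyRange 1 (M + 1) 1).map (fun k =>
      ((PySem.List.pyRange 0 M 1).foldl (fun (st : Int × Int) i =>
          let c := PySem.List.pyGetD gc i 0
          let vl := if c > 0 then st.2 + 1 else (0 : Int)
          let cnt := if vl = k then st.1 + 1 else if vl > k then st.1 + 1 else st.1
          (cnt, vl)) (0, 0)).1))
    = (pvDesc M.toNat).reverse.map (fun k => ((pvStreaks 0 gc).countP (fun v => k ≤ v) : Int)) := by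
  rw [pyRange_pos_eq_pvDesc_reverse]
  apply List.map_congr_left
  intro k hk
  rw [List.mem_reverse, mem_pvDesc] at hk
  have hM : (gc.length : Int) = M := by omega
  have h1 := PySem.List.foldl_pyRange_zero_pyGetD' gc 0
      (fun (st : Int × Int) c =>
        let vl := if c > 0 then st.2 + 1 else (0 : Int)
        let cnt := if vl = k then st.1 + 1 else if vl > k then st.1 + 1 else st.1
        (cnt, vl)) (0, 0)
  have h2 : ((PySem.List.pyRange 0 M 1).foldl (fun (st : Int × Int) i =>
          let c := PySem.List.pyGetD gc i 0
          let vl := if c > 0 then st.2 + 1 else (0 : Int)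
          let cnt := if vl = k then st.1 + 1 else if vl > k then st.1 + 1 else st.1
          (cnt, vl)) (0, 0))
      = gc.foldl (fun (st : Int × Int) c =>
          let vl := if c > 0 then st.2 + 1 else (0 : Int)
          let cnt := if vl = k then st.1 + 1 else if vl > k then st.1 + 1 else st.1
          (cnt, vl)) (0, 0) := by
    rw [show (M : Int) = (gc.length : Int) by omega]
    exact h1
  rw [h2, innerA_eq_countP k (by omega) gc 0 0, zero_add]

theorem portB_char (M : Int) (gc : List Int) (hlen : gc.length = M.toNat) :
    ((((PySem.List.pyRange M 0 (-1)).foldl (fun (st : Int × List Int) k =>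
        let s := st.1 + (((gc.foldl (fun (st : List Int × Int) c =>
              let s := if c > 0 then st.2 + 1 else (0 : Int)
              (st.1 ++ [s], s)) ([], 0)).1).foldl
                (fun (d : PySem.Dict Int Int) v => d.insert v (d.getD v 0 + 1)) PySem.Dict.empty).getD k 0
        (s, st.2 ++ [s])) (0, [])).2).reverse)
    = (pvDesc M.toNat).reverse.map (fun k => ((pvStreaks 0 gc).countP (fun v => k ≤ v) : Int)) := by
  have hstreaks : (gc.foldl (fun (st : List Int × Int) c =>
        let s := if c > 0 then st.2 + 1 else (0 : Int)
        (st.1 ++ [s], s)) ([], 0)).1 = pvStreaks 0 gc := by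
    rw [streaks_foldl gc [] 0, List.nil_append]
  rw [hstreaks]
  have hhist : ∀ v : Int, ((pvStreaks 0 gc).foldl
      (fun (d : PySem.Dict Int Int) v => d.insert v (d.getD v 0 + 1)) PySem.Dict.empty).getD v 0
        = ((pvStreaks 0 gc).count v : Int) := by
    intro v
    rw [PySem.Dict.getD_foldl_insert_add_one]
    simp
  simp only [hhist]
  rw [pyRange_neg_eq_pvDesc]
  have hscan : ((pvDesc M.toNat).foldl (fun (st : Int × List Int) k =>
      let s := st.1 + ((pvStreaks 0 gc).count k : Int)
      (s, st.2 ++ [s])) (0, [])).2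
      = [] ++ pvScan (fun k => ((pvStreaks 0 gc).count k : Int)) 0 (pvDesc M.toNat) :=
    scan_foldl (fun k => ((pvStreaks 0 gc).count k : Int)) (pvDesc M.toNat) 0 []
  rw [hscan, List.nil_append, pvScan_pvDesc, ← List.map_reverse]
  apply List.map_congr_left
  intro k hk
  rw [List.mem_reverse, mem_pvDesc] at hk
  rw [zero_add]
  unfold pvSsum
  rw [sum_counts_eq_countP (pvStreaks 0 gc) (fun v => k ≤ v) (pvDesc M.toNat)
      (nodup_pvDesc M.toNat)]
  intro x hx hpx
  have hb := mem_pvStreaks_bound gc 0 le_rfl x hx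
  rw [mem_pvDesc]
  simp at hpx
  omega

-- ===== VERDICT (by name: the statement is the Claim_ definition above) =====
theorem calculate_good_sequences_spec : Claim_equal_calculate_good_sequences := by
  intro M pairs _ _
  unfold Spec_calculate_good_sequences
  have hlen : (pairs.foldl (fun gc ab => pvIncr (pvIncr gc (ab.1 - 1)) (ab.2 - 1)) (List.replicate M.toNat 0)).length = M.toNat := by
    rw [length_good_count, List.length_replicate]
  have hA : calculate_good_sequences M pairs
      = (pvDesc M.toNat).reverse.map (fun k =>
          ((pvStreaks 0 (pairs.foldl (fun gc ab => pvIncr (pvIncr gc (ab.1 - 1)) (ab.2 - 1)) (List.replicate M.toNat 0))).countP (fun v => k ≤ v) : Int)) :=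
    portA_char M _ hlen
  have hB : calculate_good_sequences_alt M pairs
      = (pvDesc M.toNat).reverse.map (fun k =>
          ((pvStreaks 0 (pairs.foldl (fun gc ab => pvIncr (pvIncr gc (ab.1 - 1)) (ab.2 - 1)) (List.replicate M.toNat 0))).countP (fun v => k ≤ v) : Int)) :=
    portB_char M _ hlen
  rw [hA, hB]
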